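-- pv_equiv track=rewrite | github.com/bw20/football-dashboard | test.py | seasons_dictionary
-- ===== SOURCE A (Python) =====
-- def seasons_dictionary(starting_decade, ending_decade):
--     #Create a dictionary with the decades and seasons for each dataset.
--     eng = '\england-master'
--     seasons = {}
--     for i in range(int(abs((starting_decade - ending_decade)/10)) + 1):
--         decade = starting_decade
--         decade_string = str(decade) + 's'
--         list_of_seasons = []
--         for i in range(10):
--             season = str(decade + i) + '-' + str(decade + i + 1)[2:4]
--             list_of_seasons.append(season)
--             seasons[decade_string] = list_of_seasons
--         starting_decade += 10
--     df_dictionary = {}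
--     for decade in seasons:
--         for season in seasons[decade]:
--             path = eng + '\\' + decade + '\\' + season + '\eng.1.csv'
--             df_name = 'df_eng_' + season
--             df_dictionary[df_name] = path
--     return df_dictionary
-- ===== SOURCE B (Python) =====
-- def seasons_dictionary(starting_decade, ending_decade):
--     # Single flat pass over consecutive years; collect (name, path) pairs, then dict() them.
--     eng = '\england-master'
--     n = abs(starting_decade - ending_decade) // 10 + 1
--     pairs = []
--     for year in range(starting_decade, starting_decade + 10 * n):
--         decade = year - (year - starting_decade) % 10
--         season = str(year) + '-' + str(year + 1)[2:4]
--         pairs.append(('df_eng_' + season,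
--                       eng + '\\' + str(decade) + 's' + '\\' + season + '\eng.1.csv'))
--     return dict(pairs)
-- ===== Notes on version B (the rewrite author's own statement) =====
-- stated objective: alternative
-- what changed: B replaces A's two nested-loop phases (seasons dict of per-decade lists, then a dict-of-dicts traversal) by one flat loop over consecutive years that builds a pair list, recovering each decade arithmetically with (year-start)%10, and returns dict(pairs).
import Mathlib
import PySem

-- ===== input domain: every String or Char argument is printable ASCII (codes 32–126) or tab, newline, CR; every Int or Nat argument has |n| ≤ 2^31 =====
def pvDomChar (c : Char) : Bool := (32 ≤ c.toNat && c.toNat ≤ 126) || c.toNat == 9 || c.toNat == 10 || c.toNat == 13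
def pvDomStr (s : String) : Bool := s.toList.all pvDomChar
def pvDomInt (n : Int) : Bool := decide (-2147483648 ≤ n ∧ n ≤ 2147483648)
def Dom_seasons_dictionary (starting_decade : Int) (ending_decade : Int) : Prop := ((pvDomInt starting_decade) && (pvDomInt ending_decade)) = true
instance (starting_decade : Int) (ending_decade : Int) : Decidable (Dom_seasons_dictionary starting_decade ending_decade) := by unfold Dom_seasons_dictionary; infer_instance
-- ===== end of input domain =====

-- B replaces A's two nested-loop phases by one flat loop over consecutive years building a pair
-- list (decade recovered arithmetically), then dict(pairs) (objective: alternative); same return value.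

-- ===== PORT A =====
-- int(abs((a-b)/10)) : the CPython float quotient |a-b|/10 (|a-b| ≤ 2^32 < 2^53, exactly representable)
-- truncates to exactly |a-b| // 10, i.e. (a-b).natAbs / 10 — exact on the whole Dom_ range.
def seasons_dictionary (starting_decade : Int) (ending_decade : Int) : List (String × String) :=
  let eng := "\\england-master"
  let seasons := (PySem.List.pyRange 0 ((((starting_decade - ending_decade).natAbs / 10 : Nat) : Int) + 1) 1).foldl
    (fun (st : Int × PySem.Dict String (List String)) _ =>
      let decade := st.1
      let decade_string := PySem.Int.toStr decade ++ "s"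
      let inner := (PySem.List.pyRange 0 10 1).foldl
        (fun (p : List String × PySem.Dict String (List String)) i =>
          let season := PySem.Int.toStr (decade + i) ++ "-" ++
            PySem.Str.slice (PySem.Int.toStr (decade + i + 1)) (some 2) (some 4)
          let lst := p.1 ++ [season]
          (lst, p.2.insert decade_string lst))
        ([], st.2)
      (decade + 10, inner.2))
    (starting_decade, PySem.Dict.empty)
  let df := (PySem.Dict.keys seasons.2).foldl
    (fun (d : PySem.Dict String String) decade =>
      -- seasons[decade]: decade is iterated from the dict's own keys, so the lookup cannot fail; getD [] is exact
      ((seasons.2).getD decade []).foldl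
        (fun d season =>
          d.insert ("df_eng_" ++ season) (eng ++ "\\" ++ decade ++ "\\" ++ season ++ "\\eng.1.csv")) d)
    PySem.Dict.empty
  df.items

-- ===== PORT B =====
-- abs(s-e) // 10 : Python floor division of the nonnegative |s-e|, ported as PySem.Int.floordiv |s-e| 10.
def seasons_dictionary_alt (starting_decade : Int) (ending_decade : Int) : List (String × String) :=
  let eng := "\\england-master"
  let n := PySem.Int.floordiv (((starting_decade - ending_decade).natAbs : Nat) : Int) 10 + 1
  let pairs := (PySem.List.pyRange starting_decade (starting_decade + 10 * n) 1).foldl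
    (fun (acc : List (String × String)) year =>
      let decade := year - PySem.Int.mod (year - starting_decade) 10
      let season := PySem.Int.toStr year ++ "-" ++
        PySem.Str.slice (PySem.Int.toStr (year + 1)) (some 2) (some 4)
      acc ++ [("df_eng_" ++ season,
        eng ++ "\\" ++ PySem.Int.toStr decade ++ "s" ++ "\\" ++ season ++ "\\eng.1.csv")])
    []
  (PySem.Dict.ofList pairs).items

-- ===== PRECONDITION & SPEC =====
def Spec_seasons_dictionary (starting_decade : Int) (ending_decade : Int) (out : List (String × String)) : Prop := out = seasons_dictionary_alt starting_decade ending_decade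
instance (starting_decade : Int) (ending_decade : Int) (out : List (String × String)) : Decidable (Spec_seasons_dictionary starting_decade ending_decade out) := by unfold Spec_seasons_dictionary; infer_instance

-- ===== CLAIM (what is proved, stated in full; the proofs are below) =====
def Claim_equal_seasons_dictionary : Prop := ∀ (starting_decade : Int) (ending_decade : Int), Dom_seasons_dictionary starting_decade ending_decade → Spec_seasons_dictionary starting_decade ending_decade (seasons_dictionary starting_decade ending_decade)

-- ===== LEMMAS AND PROOFS =====
theorem pv_digitChar_ne (d : Nat) (h : d < 10) : Nat.digitChar d ≠ '-' := by
  interval_cases d <;> decide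

theorem pv_digitChar_inj (a b : Nat) (ha : a < 10) (hb : b < 10)
    (h : Nat.digitChar a = Nat.digitChar b) : a = b := by
  interval_cases a <;> interval_cases b <;> first | rfl | exact absurd h (by decide)

theorem pv_toDigitsCore_eq (f : Nat) : ∀ (n : Nat) (acc : List Char), 0 < n → n < 10 ^ f →
    Nat.toDigitsCore 10 f n acc = ((Nat.digits 10 n).map Nat.digitChar).reverse ++ acc := by
  induction f with
  | zero => intro n acc h1 h2; omega
  | succ f ih =>
    intro n acc h1 h2
    rw [Nat.toDigitsCore]
    rw [Nat.digits_def' (by norm_num : 1 < 10) h1]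
    by_cases hz : n / 10 = 0
    · rw [if_pos hz, hz]
      simp
    · rw [if_neg hz]
      rw [ih (n / 10) _ (Nat.pos_of_ne_zero hz) (by rw [pow_succ] at h2; omega)]
      simp

def pvRep (n : Nat) : List Char :=
  if n = 0 then ['0'] else ((Nat.digits 10 n).map Nat.digitChar).reverse

theorem pv_toDigits_eq (n : Nat) : Nat.toDigits 10 n = pvRep n := by
  unfold pvRep
  by_cases h : n = 0
  · subst h; rfl
  · rw [if_neg h, Nat.toDigits,
      pv_toDigitsCore_eq (n + 1) n [] (Nat.pos_of_ne_zero h)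
        (lt_of_lt_of_le (Nat.lt_pow_self (by norm_num)) (Nat.pow_le_pow_right (by norm_num) (by omega))),
      List.append_nil]

theorem pv_mem_rep_ne (n : Nat) (c : Char) (h : c ∈ pvRep n) : c ≠ '-' := by
  unfold pvRep at h
  by_cases hz : n = 0
  · rw [if_pos hz] at h; simp at h; subst h; decide
  · rw [if_neg hz] at h
    rw [List.mem_reverse, List.mem_map] at h
    obtain ⟨d, hd, rfl⟩ := h
    exact pv_digitChar_ne d (Nat.digits_lt_base (by norm_num) hd)

theorem pv_map_digitChar_inj : ∀ (l1 l2 : List Nat), (∀ x ∈ l1, x < 10) → (∀ x ∈ l2, x < 10) →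
    l1.map Nat.digitChar = l2.map Nat.digitChar → l1 = l2 := by
  intro l1
  induction l1 with
  | nil => intro l2 _ _ h; cases l2 <;> simp_all
  | cons x xs ih =>
    intro l2 h1 h2 h
    cases l2 with
    | nil => simp at h
    | cons y ys =>
      simp only [List.map_cons, List.cons.injEq] at h
      have hx := pv_digitChar_inj x y (h1 x (by simp)) (h2 y (by simp)) h.1
      have := ih ys (fun z hz => h1 z (by simp [hz])) (fun z hz => h2 z (by simp [hz])) h.2
      simp [hx, this]

theorem pv_rep_zero_case (b : Nat) (hb : b ≠ 0) (h : ['0'] = ((Nat.digits 10 b).map Nat.digitChar).reverse) : False := by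
  have hlen : (Nat.digits 10 b).length = 1 := by
    have := congrArg List.length h; simpa using this.symm
  obtain ⟨d, hd⟩ := List.length_eq_one_iff.mp hlen
  rw [hd] at h
  simp at h
  have hd10 : d < 10 := Nat.digits_lt_base (by norm_num) (by rw [hd]; simp)
  have : d = 0 := pv_digitChar_inj d 0 hd10 (by norm_num) (by rw [← h]; rfl)
  have hlast := Nat.getLast_digit_ne_zero 10 hb
  simp [hd] at hlast; omega

theorem pv_rep_inj (a b : Nat) (h : pvRep a = pvRep b) : a = b := by
  unfold pvRep at h
  by_cases ha : a = 0 <;> by_cases hb : b = 0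
  · omega
  · rw [if_pos ha, if_neg hb] at h
    exact absurd h (fun h => pv_rep_zero_case b hb h)
  · rw [if_neg ha, if_pos hb] at h
    exact absurd h.symm (fun h => pv_rep_zero_case a ha h)
  · rw [if_neg ha, if_neg hb] at h
    exact Nat.digits.injective 10 (pv_map_digitChar_inj _ _
      (fun x hx => Nat.digits_lt_base (by norm_num) hx)
      (fun x hx => Nat.digits_lt_base (by norm_num) hx)
      (List.reverse_injective h))

theorem pv_toChars_inj (a b : Int) (h : PySem.Int.toChars a = PySem.Int.toChars b) : a = b := by
  unfold PySem.Int.toChars at h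
  by_cases ha : a < 0 <;> by_cases hb : b < 0
  · rw [if_pos ha, if_pos hb] at h
    simp only [List.cons.injEq] at h
    have := pv_rep_inj a.natAbs b.natAbs (by rw [← pv_toDigits_eq, ← pv_toDigits_eq]; exact h.2)
    omega
  · rw [if_pos ha, if_neg hb] at h
    have : '-' ∈ Nat.toDigits 10 b.toNat := by rw [← h]; simp
    rw [pv_toDigits_eq] at this
    exact absurd rfl (pv_mem_rep_ne _ _ this)
  · rw [if_neg ha, if_pos hb] at h
    have : '-' ∈ Nat.toDigits 10 a.toNat := by rw [h]; simp
    rw [pv_toDigits_eq] at this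
    exact absurd rfl (pv_mem_rep_ne _ _ this)
  · rw [if_neg ha, if_neg hb] at h
    have := pv_rep_inj a.toNat b.toNat (by rw [← pv_toDigits_eq, ← pv_toDigits_eq]; exact h)
    omega

def pvSeas (y : Int) : String :=
  PySem.Int.toStr y ++ "-" ++ PySem.Str.slice (PySem.Int.toStr (y + 1)) (some 2) (some 4)

def pvKey (dec : Int) : String := PySem.Int.toStr dec ++ "s"

def pvSList (dec : Int) : List String :=
  [pvSeas (dec + 0), pvSeas (dec + 1), pvSeas (dec + 2), pvSeas (dec + 3), pvSeas (dec + 4),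
   pvSeas (dec + 5), pvSeas (dec + 6), pvSeas (dec + 7), pvSeas (dec + 8), pvSeas (dec + 9)]

theorem pv_range_ten : PySem.List.pyRange 0 10 1 = [0,1,2,3,4,5,6,7,8,9] := by decide

theorem pv_key_inj (s : Int) : Function.Injective (fun j : Nat => pvKey (s + 10 * (j : Int))) := by
  intro a b h
  simp only [pvKey] at h
  have h2 := congrArg String.toList h
  simp only [String.toList_append] at h2
  rw [PySem.Int.toList_toStr, PySem.Int.toList_toStr] at h2
  have h3 := List.append_cancel_right h2
  have := pv_toChars_inj _ _ h3
  omega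

-- inner loop of port A: appends the 10 seasons and (re)inserts them under the decade key
theorem pv_innerA (dec : Int) (d : PySem.Dict String (List String)) :
    (PySem.List.pyRange 0 10 1).foldl
      (fun (p : List String × PySem.Dict String (List String)) i =>
        (p.1 ++ [PySem.Int.toStr (dec + i) ++ "-" ++
            PySem.Str.slice (PySem.Int.toStr (dec + i + 1)) (some 2) (some 4)],
         p.2.insert (PySem.Int.toStr dec ++ "s")
           (p.1 ++ [PySem.Int.toStr (dec + i) ++ "-" ++
             PySem.Str.slice (PySem.Int.toStr (dec + i + 1)) (some 2) (some 4)])))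
      ([], d)
    = (pvSList dec, d.insert (pvKey dec) (pvSList dec)) := by
  rw [pv_range_ten]
  simp only [List.foldl, PySem.Dict.insert_insert_self, pvSList, pvSeas, pvKey, List.nil_append,
    List.cons_append, add_zero]

-- outer loop of port A after the inner loop is summarised
theorem pv_outerA (n : Nat) (s : Int) (d : PySem.Dict String (List String)) :
    (List.range n).foldl
      (fun (st : Int × PySem.Dict String (List String)) (_ : Nat) =>
        (st.1 + 10, st.2.insert (pvKey st.1) (pvSList st.1))) (s, d)
    = (s + 10 * n,
       (List.range n).foldl (fun d (j : Nat) =>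
         d.insert (pvKey (s + 10 * (j : Int))) (pvSList (s + 10 * (j : Int)))) d) := by
  induction n generalizing d with
  | zero => simp
  | succ n ih =>
    rw [List.range_succ, List.foldl_append, List.foldl_append, ih]
    simp only [List.foldl, Prod.mk.injEq]
    exact ⟨by push_cast; ring, trivial⟩

def pvDictN (n : Nat) (s : Int) : PySem.Dict String (List String) :=
  (List.range n).foldl (fun d (j : Nat) =>
    d.insert (pvKey (s + 10 * (j : Int))) (pvSList (s + 10 * (j : Int)))) PySem.Dict.empty

theorem pv_items (n : Nat) (s : Int) :
    (pvDictN n s).items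
      = (List.range n).map (fun (j : Nat) => (pvKey (s + 10 * (j : Int)), pvSList (s + 10 * (j : Int)))) := by
  unfold pvDictN
  rw [PySem.Dict.items_foldl_insert_fresh _ _ _ _
    (fun a _ => PySem.Dict.contains_empty _)
    ((List.nodup_range).map (pv_key_inj s))]
  rfl

theorem pv_keys (n : Nat) (s : Int) :
    PySem.Dict.keys (pvDictN n s) = (List.range n).map (fun (j : Nat) => pvKey (s + 10 * (j : Int))) := by
  simp only [PySem.Dict.keys, pv_items, List.map_map]
  rfl

theorem pv_nodup_keys (n : Nat) (s : Int) : (PySem.Dict.keys (pvDictN n s)).Nodup := by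
  rw [pv_keys]
  exact (List.nodup_range).map (pv_key_inj s)

theorem pv_getD (n : Nat) (s : Int) (j : Nat) (hj : j ∈ List.range n) :
    (pvDictN n s).getD (pvKey (s + 10 * (j : Int))) [] = pvSList (s + 10 * (j : Int)) := by
  apply PySem.Dict.getD_of_mem_items
  · rw [pv_items]
    exact List.mem_map_of_mem hj
  · exact pv_nodup_keys n s

theorem pv_outer_range (s e : Int) :
    PySem.List.pyRange 0 ((((s - e).natAbs / 10 : Nat) : Int) + 1) 1
      = (List.range ((s - e).natAbs / 10 + 1)).map (fun (k : Nat) => (0 : Int) + (k : Int)) := by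
  rw [PySem.List.pyRange_one]
  have h : ((((s - e).natAbs / 10 : Nat) : Int) + 1 - 0).toNat = (s - e).natAbs / 10 + 1 := by omega
  rw [h]

-- the common normal form both ports are reduced to
def pvCanon (s e : Int) : List (String × String) :=
  ((List.range ((s - e).natAbs / 10 + 1)).foldl (fun (d : PySem.Dict String String) (j : Nat) =>
      (pvSList (s + 10 * (j : Int))).foldl (fun d season =>
        d.insert ("df_eng_" ++ season)
          ("\\england-master" ++ "\\" ++ pvKey (s + 10 * (j : Int)) ++ "\\" ++ season ++ "\\eng.1.csv")) d)
    PySem.Dict.empty).items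

theorem pv_phase2 (n : Nat) (s : Int) :
    (List.range n).foldl (fun (x : PySem.Dict String String) (y : Nat) =>
        List.foldl (fun d season => d.insert ("df_eng_" ++ season)
            ("\\england-master" ++ "\\" ++ pvKey (s + 10 * (y : Int)) ++ "\\" ++ season ++ "\\eng.1.csv")) x
          ((pvDictN n s).getD (pvKey (s + 10 * (y : Int))) []))
      PySem.Dict.empty
    = (List.range n).foldl (fun (d : PySem.Dict String String) (j : Nat) =>
        (pvSList (s + 10 * (j : Int))).foldl (fun d season => d.insert ("df_eng_" ++ season)
            ("\\england-master" ++ "\\" ++ pvKey (s + 10 * (j : Int)) ++ "\\" ++ season ++ "\\eng.1.csv")) d)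
      PySem.Dict.empty := by
  apply PySem.List.foldl_congr_mem
  intro acc j hj
  rw [pv_getD n s j hj]

theorem pv_eqA (s e : Int) : seasons_dictionary s e = pvCanon s e := by
  dsimp only [seasons_dictionary]
  rw [pv_outer_range, List.foldl_map (f := fun (k : Nat) => (0 : Int) + (k : Int))]
  simp only [pv_innerA]
  rw [pv_outerA]
  rw [show ((List.range ((s - e).natAbs / 10 + 1)).foldl (fun d (j : Nat) =>
        d.insert (pvKey (s + 10 * (j : Int))) (pvSList (s + 10 * (j : Int))))
        (PySem.Dict.empty : PySem.Dict String (List String))) = pvDictN ((s - e).natAbs / 10 + 1) s from rfl]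
  rw [pv_keys]
  rw [List.foldl_map (f := fun (j : Nat) => pvKey (s + 10 * (j : Int)))]
  dsimp only
  rw [pv_phase2]
  rfl

-- ---- B-side lemmas ----

-- range(10n) split into n consecutive blocks of 10
theorem pv_chunk : ∀ n : Nat, List.range (10 * n)
    = (List.range n).flatMap (fun j => (List.range 10).map (fun i => 10 * j + i)) := by
  intro n
  induction n with
  | zero => rfl
  | succ n ih =>
    rw [Nat.mul_succ, List.range_add, ih, List.range_succ (n := n), List.flatMap_append]
    simp

-- the decade recovered arithmetically in B equals the block's decade
theorem pv_decade (s : Int) (j i : Nat) (hi : i < 10) :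
    s + ((10 * j + i : Nat) : Int) - PySem.Int.mod (s + ((10 * j + i : Nat) : Int) - s) 10
      = s + 10 * (j : Int) := by
  rw [PySem.Int.mod_eq_emod_of_pos (by norm_num)]
  omega

-- B's inner block of 10 consecutive years is A's per-decade insert run
theorem pv_innerB (s : Int) (j : Nat) (acc : PySem.Dict String String) :
    (List.range 10).foldl (fun (d : PySem.Dict String String) (i : Nat) =>
        d.insert
          ("df_eng_" ++ (PySem.Int.toStr (s + ((10 * j + i : Nat) : Int)) ++ "-" ++
            PySem.Str.slice (PySem.Int.toStr (s + ((10 * j + i : Nat) : Int) + 1)) (some 2) (some 4)))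
          ("\\england-master" ++ "\\" ++
            PySem.Int.toStr (s + ((10 * j + i : Nat) : Int) -
              PySem.Int.mod (s + ((10 * j + i : Nat) : Int) - s) 10) ++ "s" ++ "\\" ++
            (PySem.Int.toStr (s + ((10 * j + i : Nat) : Int)) ++ "-" ++
              PySem.Str.slice (PySem.Int.toStr (s + ((10 * j + i : Nat) : Int) + 1)) (some 2) (some 4)) ++
            "\\eng.1.csv")) acc
    = (pvSList (s + 10 * (j : Int))).foldl (fun d season =>
        d.insert ("df_eng_" ++ season)
          ("\\england-master" ++ "\\" ++ pvKey (s + 10 * (j : Int)) ++ "\\" ++ season ++ "\\eng.1.csv")) acc := by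
  have h0 := pv_decade s j 0 (by norm_num)
  have h1 := pv_decade s j 1 (by norm_num)
  have h2 := pv_decade s j 2 (by norm_num)
  have h3 := pv_decade s j 3 (by norm_num)
  have h4 := pv_decade s j 4 (by norm_num)
  have h5 := pv_decade s j 5 (by norm_num)
  have h6 := pv_decade s j 6 (by norm_num)
  have h7 := pv_decade s j 7 (by norm_num)
  have h8 := pv_decade s j 8 (by norm_num)
  have h9 := pv_decade s j 9 (by norm_num)
  rw [show List.range 10 = [0,1,2,3,4,5,6,7,8,9] from rfl]
  simp only [List.foldl, pvSList, pvSeas, pvKey, h0, h1, h2, h3, h4, h5, h6, h7, h8, h9]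
  push_cast
  ring_nf
  simp only [String.append_assoc]

theorem pv_eqB (s e : Int) : seasons_dictionary_alt s e = pvCanon s e := by
  dsimp only [seasons_dictionary_alt]
  rw [show PySem.Int.floordiv (((s - e).natAbs : Nat) : Int) 10 = ((((s - e).natAbs / 10 : Nat)) : Int) from by
    exact_mod_cast PySem.Int.floordiv_natCast (s - e).natAbs 10]
  rw [PySem.List.foldl_append_singleton_eq_map, List.nil_append]
  rw [PySem.List.pyRange_one]
  rw [show (s + 10 * (((((s - e).natAbs / 10 : Nat)) : Int) + 1) - s).toNat
        = 10 * ((s - e).natAbs / 10 + 1) from by omega]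
  rw [pv_chunk, List.map_map]
  unfold PySem.Dict.ofList PySem.Dict.update pvCanon
  rw [List.foldl_map, List.foldl_flatMap]
  apply congrArg PySem.Dict.items
  apply PySem.List.foldl_congr_mem
  intro acc j _
  rw [List.foldl_map]
  exact pv_innerB s j acc

theorem pv_main (s e : Int) : seasons_dictionary s e = seasons_dictionary_alt s e := by
  rw [pv_eqA, pv_eqB]

-- ===== VERDICT (by name: the statement is the Claim_ definition above) =====
theorem seasons_dictionary_spec : Claim_equal_seasons_dictionary := by
  intro s e _
  unfold Spec_seasons_dictionary
  exact pv_main s e
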